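-- pv_equiv track=rewrite | github.com/ngocuong0105/usaco | silver/convention.py | count
-- ===== SOURCE A (Python) =====
-- def count(nums,wait,cap):
--     buses,curr,first = 1,1,nums[0]
--     for t in nums[1:]:
--         if curr + 1 <= cap and t-first <= wait:
--             curr += 1
--         else:
--             first = t
--             curr = 1
--             buses += 1
--     return buses
-- ===== SOURCE B (Python) =====
-- def count(nums, wait, cap):
--     # staged design: split nums into explicit busload chunks, then count them
--     def load(xs):
--         # size of the busload at the head of xs = index of the first misfit
--         return next((i for i in range(1, len(xs))
--                      if i >= cap or xs[i] - xs[0] > wait), len(xs))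
--     def groups(xs):
--         if not xs:
--             return []
--         k = load(xs)
--         return [xs[:k]] + groups(xs[k:])
--     return len(groups(nums))
-- ===== Notes on version B (the rewrite author's own statement) =====
-- stated objective: alternative
-- what changed: Replaced A's single fold over a (buses,curr,first) counter triple by a staged design: a recursive splitter partitions the list into explicit busload chunks (each chunk boundary found by a first-misfit search), and the answer is the number of chunks.
import Mathlib
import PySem

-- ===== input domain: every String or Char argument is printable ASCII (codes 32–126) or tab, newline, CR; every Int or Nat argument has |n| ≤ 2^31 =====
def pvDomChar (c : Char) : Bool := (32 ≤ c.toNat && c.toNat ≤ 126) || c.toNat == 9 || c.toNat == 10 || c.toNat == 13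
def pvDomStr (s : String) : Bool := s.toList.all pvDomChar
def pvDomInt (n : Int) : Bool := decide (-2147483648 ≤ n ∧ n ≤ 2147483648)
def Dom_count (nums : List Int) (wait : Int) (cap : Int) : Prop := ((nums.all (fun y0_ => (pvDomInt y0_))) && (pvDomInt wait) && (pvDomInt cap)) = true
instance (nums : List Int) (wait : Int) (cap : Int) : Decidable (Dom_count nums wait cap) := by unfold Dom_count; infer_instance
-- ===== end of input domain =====

-- B replaces A's single counting fold by a staged design: a recursive splitter that
-- partitions the list into explicit busload chunks, whose number is the answer;
-- equivalence of return values is proved on non-empty input (A raises IndexError on []).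


-- ===== PORT A =====
-- the body of A's for-loop, over state (buses, curr, first)
def countStepA (wait : Int) (cap : Int) (s : Int × Int × Int) (t : Int) : Int × Int × Int :=
  if s.2.1 + 1 ≤ cap ∧ t - s.2.2 ≤ wait then (s.1, s.2.1 + 1, s.2.2)
  else (s.1 + 1, 1, t)

def count (nums : List Int) (wait : Int) (cap : Int) : Int :=
  match PySem.List.pyGet? nums 0 with   -- nums[0]; none = IndexError, excluded by Pre_count
  | none => 0
  | some first =>
    (List.foldl (countStepA wait cap) (1, 1, first) (PySem.List.slice nums (some 1) none)).1

-- ===== PORT B =====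
-- Source B's `load`: next((i for i in range(1, len(xs)) if i >= cap or xs[i]-xs[0] > wait), len(xs))
-- ported as the scan over i = 1, 2, … returning the first hit, default len(xs);
-- xs[i] with 0 ≤ i < len(xs) is exactly List.getD
def loadScanB (xs : List Int) (wait : Int) (cap : Int) (i : Nat) : Nat :=
  if h : i < xs.length then
    if (cap ≤ (i : Int)) ∨ wait < xs.getD i 0 - xs.getD 0 0 then i
    else loadScanB xs wait cap (i + 1)
  else xs.length
termination_by xs.length - i
decreasing_by omega

theorem loadScanB_pos (xs : List Int) (wait cap : Int) (i : Nat)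
    (hi : 1 ≤ i) (hx : xs ≠ []) : 1 ≤ loadScanB xs wait cap i := by
  unfold loadScanB
  split
  · split
    · exact hi
    · exact loadScanB_pos xs wait cap (i + 1) (by omega) hx
  · cases xs with
    | nil => exact absurd rfl hx
    | cons a l => simp
termination_by xs.length - i
decreasing_by omega

-- Source B's `groups`: recursive splitter into busload chunks (xs[:k] / xs[k:] are exact
-- List.take / List.drop for 0 ≤ k)
def groupsB (wait : Int) (cap : Int) (xs : List Int) : List (List Int) :=
  if h : xs = [] then []
  else
    let k := loadScanB xs wait cap 1
    xs.take k :: groupsB wait cap (xs.drop k)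
termination_by xs.length
decreasing_by
  have hk := loadScanB_pos xs wait cap 1 le_rfl h
  have hlen : xs.length ≠ 0 := fun he => h (List.eq_nil_of_length_eq_zero he)
  simp only [List.length_drop]
  omega

def count_alt (nums : List Int) (wait : Int) (cap : Int) : Int :=
  ((groupsB wait cap nums).length : Int)

-- ===== PRECONDITION & SPEC =====
-- Pre_count excludes exactly the inputs where A raises IndexError (empty nums)
def Pre_count (nums : List Int) (wait : Int) (cap : Int) : Prop := nums ≠ []
instance (nums : List Int) (wait : Int) (cap : Int) : Decidable (Pre_count nums wait cap) := by
  unfold Pre_count; infer_instance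

def pvWitness_count : List Int × Int × Int := ([0, 3, 10, 11], 4, 2)

def Spec_count (nums : List Int) (wait : Int) (cap : Int) (out : Int) : Prop := out = count_alt nums wait cap
instance (nums : List Int) (wait : Int) (cap : Int) (out : Int) : Decidable (Spec_count nums wait cap out) := by unfold Spec_count; infer_instance

-- ===== CLAIM (what is proved, stated in full; the proofs are below) =====
def Claim_equal_count : Prop := ∀ (nums : List Int) (wait : Int) (cap : Int), Dom_count nums wait cap → Pre_count nums wait cap → Spec_count nums wait cap (count nums wait cap)

-- ===== LEMMAS AND PROOFS =====

-- Bridge: mid-chunk, A's fold over the rest of the suffix xs (current chunk started at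
-- xs[0], relative position i, B buses counted so far including the current one) equals
-- B buses plus the chunks B's splitter makes of what remains after the current chunk ends.
theorem bridge (wait cap : Int) (xs : List Int) (i : Nat) (B : Int)
    (h1 : 1 ≤ i) (hi : i ≤ xs.length) :
    (List.foldl (countStepA wait cap) (B, (i : Int), xs.getD 0 0) (xs.drop i)).1
      = B + ((groupsB wait cap (xs.drop (loadScanB xs wait cap i))).length : Int) := by
  rw [loadScanB]
  by_cases hin : i < xs.length
  · have hdrop := List.drop_eq_getElem_cons hin
    have hget := List.getD_eq_getElem xs 0 hin
    rw [dif_pos hin]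
    by_cases hc : (cap ≤ (i : Int)) ∨ wait < xs.getD i 0 - xs.getD 0 0
    · -- first misfit at i: a new bus starts here
      rw [if_pos hc]
      have hne : xs.drop i ≠ [] := by simp [List.drop_eq_nil_iff]; omega
      have hlen' : 1 ≤ (xs.drop i).length := by rw [List.length_drop]; omega
      have hrec := bridge wait cap (xs.drop i) 1 (B + 1) le_rfl hlen'
      have hd0 : (xs.drop i).getD 0 0 = xs[i]'hin := by rw [hdrop]; rfl
      have hd1 : (xs.drop i).drop 1 = xs.drop (i + 1) := by
        rw [List.drop_drop]
      rw [hd0, hd1, hdrop] at hrec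
      simp only [Nat.cast_one] at hrec
      rw [hdrop, List.foldl_cons]
      have hstep : countStepA wait cap (B, (i : Int), xs.getD 0 0) (xs[i]'hin)
          = (B + 1, 1, xs[i]'hin) := by
        simp only [countStepA]
        rw [if_neg (by rw [hget] at hc; omega)]
      rw [hstep, hrec]
      conv_rhs => rw [groupsB]
      rw [dif_neg (List.cons_ne_nil _ _)]
      simp only [List.length_cons]
      push_cast
      ring
    · -- xs[i] still fits on the current bus
      rw [if_neg hc]
      have hrec := bridge wait cap xs (i + 1) B (by omega) (by omega)
      rw [hdrop, List.foldl_cons]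
      have hstep : countStepA wait cap (B, (i : Int), xs.getD 0 0) (xs[i]'hin)
          = (B, (i : Int) + 1, xs.getD 0 0) := by
        simp only [countStepA]
        rw [if_pos (by rw [hget] at hc; omega)]
      rw [hstep]
      have hcast : ((i : Int) + 1) = (((i + 1 : Nat)) : Int) := by push_cast; ring
      rw [hcast]
      exact hrec
  · -- i = xs.length: the list is exhausted
    have hieq : i = xs.length := by omega
    rw [dif_neg hin]
    subst hieq
    simp [List.drop_length, groupsB]
termination_by xs.length - i
decreasing_by
  all_goals try rw [List.length_drop]
  all_goals omega

-- ===== VERDICT (by name: the statement is the Claim_ definition above) =====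
theorem count_spec : Claim_equal_count := by
  intro nums wait cap _ hpre
  unfold Spec_count count count_alt
  match nums, hpre with
  | x :: rest, _ =>
    simp only [PySem.List.pyGet?_zero_cons, PySem.List.slice_from_one, List.tail_cons]
    have hb := bridge wait cap (x :: rest) 1 1 le_rfl (by simp)
    simp only [List.drop_one, List.tail_cons, List.getD_cons_zero, Nat.cast_one] at hb
    rw [hb]
    conv_rhs => rw [groupsB]
    rw [dif_neg (by simp)]
    simp only [List.length_cons]
    push_cast
    ring
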